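-- pv_equiv track=rewrite | github.com/PearuUu/CKE_Zbor_Zadan_zadanie_praktyczne | 69.py | Z1v2
-- ===== SOURCE A (Python) =====
-- def Z1v2(genotypy):
--     dlugosci = {}
--     for i in genotypy:
--         if len(i) not in dlugosci:
--             dlugosci[len(i)] = 1
--         else:
--             dlugosci[len(i)] += 1
--     max = 0
--     for j in dlugosci.values():
--         if j > max:
--             max = j
--
--     return len(dlugosci), max
-- ===== SOURCE B (Python) =====
-- def Z1v2(genotypy):
--     lens = [len(g) for g in genotypy]
--
--     def go(ls):
--         if not ls:
--             return (0, 0)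
--         rest = [x for x in ls if x != ls[0]]
--         d, m = go(rest)
--         c = len(ls) - len(rest)
--         return (d + 1, m if m > c else c)
--
--     return go(lens)
-- ===== Notes on version B (the rewrite author's own statement) =====
-- stated objective: alternative
-- what changed: Replaces the frequency-dictionary pass plus max-scan over dict values with a recursive partition: repeatedly take the first length, remove all its occurrences by filtering, count them by the length difference, and recurse on the remainder.
import Mathlib
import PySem

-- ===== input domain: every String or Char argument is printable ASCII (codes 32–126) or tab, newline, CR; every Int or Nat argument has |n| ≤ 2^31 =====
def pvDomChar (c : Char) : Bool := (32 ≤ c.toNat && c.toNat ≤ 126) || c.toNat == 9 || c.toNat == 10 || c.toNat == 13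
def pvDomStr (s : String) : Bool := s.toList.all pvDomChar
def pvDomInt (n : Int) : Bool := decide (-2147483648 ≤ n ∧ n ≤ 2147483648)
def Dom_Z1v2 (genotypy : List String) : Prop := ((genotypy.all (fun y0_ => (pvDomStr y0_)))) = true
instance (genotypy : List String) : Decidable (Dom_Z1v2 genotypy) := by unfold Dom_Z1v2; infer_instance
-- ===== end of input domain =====

-- B replaces A's frequency-dictionary pass (plus a max-scan over its values) with a
-- recursive partition on the list of lengths: take the first length, filter out all its
-- occurrences, count them by the length difference, recurse on the remainder (alternative
-- decomposition, similar cost).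


-- ===== PORT A =====
def Z1v2 (genotypy : List String) : Int × Int :=
  let dlugosci : PySem.Dict Int Int :=
    genotypy.foldl (fun d i =>
      if !(d.contains (PySem.Str.len i)) then d.insert (PySem.Str.len i) 1
      else d.insert (PySem.Str.len i) (d.getD (PySem.Str.len i) 0 + 1)) PySem.Dict.empty
  let mx : Int := dlugosci.values.foldl (fun m j => if j > m then j else m) 0
  ((dlugosci.size : Int), mx)

-- ===== PORT B =====
-- the inner recursive helper `go` of Source B
def Z1v2Go (ls : List Int) : Int × Int :=
  match ls with
  | [] => (0, 0)
  | x :: xs =>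
    let rest := List.filter (fun y => y != x) (x :: xs)
    let dm := Z1v2Go rest
    let c : Int := ((x :: xs).length : Int) - (rest.length : Int)
    (dm.1 + 1, if dm.2 > c then dm.2 else c)
termination_by ls.length
decreasing_by
  rw [List.filter_cons_of_neg (by simp)]
  exact Nat.lt_succ_of_le (List.length_filter_le _ xs)

def Z1v2_alt (genotypy : List String) : Int × Int :=
  Z1v2Go (genotypy.map (fun g => PySem.Str.len g))

-- ===== PRECONDITION & SPEC =====
def Spec_Z1v2 (genotypy : List String) (out : Int × Int) : Prop := out = Z1v2_alt genotypy
instance (genotypy : List String) (out : Int × Int) : Decidable (Spec_Z1v2 genotypy out) := by unfold Spec_Z1v2; infer_instance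

-- ===== CLAIM (what is proved, stated in full; the proofs are below) =====
def Claim_equal_Z1v2 : Prop := ∀ (genotypy : List String), Dom_Z1v2 genotypy → Spec_Z1v2 genotypy (Z1v2 genotypy)

-- ===== LEMMAS AND PROOFS =====

-- common characterisation of both programs' result:
-- (number of distinct lengths, maximal multiplicity of a length)
def pvSpecPair (ls : List Int) : Int × Int :=
  (((PySem.Set.ofList ls).length : Int),
   ((PySem.Set.ofList ls).map (fun k => ((ls.count k : Nat) : Int))).foldl
     (fun m j => if j > m then j else m) 0)

theorem pvMaxStep (m j : Int) : (if j > m then j else m) = max m j := by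
  split <;> omega

theorem pvFoldlMaxShift (L : List Int) : ∀ a b : Int,
    L.foldl (fun m j => max m j) (max a b) = max a (L.foldl (fun m j => max m j) b) := by
  induction L with
  | nil => intro a b; rfl
  | cons j t ih =>
    intro a b
    simp only [List.foldl_cons, max_assoc]
    exact ih a (max b j)

-- PySem.Set.ofList commutes with removing every occurrence of one value
theorem pvOfListFilter (x : Int) (ls : List Int) :
    (PySem.Set.ofList ls).discard x = PySem.Set.ofList (ls.filter (fun y => y != x)) := by
  induction ls with
  | nil => rfl
  | cons y t ih =>
    by_cases h : y = x
    · subst h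
      rw [PySem.Set.ofList_cons]
      show List.filter (fun z => !(z == y)) (y :: (PySem.Set.ofList t).discard y)
          = PySem.Set.ofList ((y :: t).filter (fun z => z != y))
      rw [List.filter_cons_of_neg (by simp), List.filter_cons_of_neg (by simp)]
      show ((PySem.Set.ofList t).discard y).discard y = _
      rw [ih]
      apply List.filter_eq_self.2
      intro a ha
      have := (PySem.Set.mem_ofList _ _).1 ha
      simp only [List.mem_filter] at this
      simpa using this.2
    · rw [PySem.Set.ofList_cons]
      show List.filter (fun z => !(z == x)) (y :: (PySem.Set.ofList t).discard y)
          = PySem.Set.ofList ((y :: t).filter (fun z => z != x))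
      rw [List.filter_cons_of_pos (by simpa using h), List.filter_cons_of_pos (by simpa using h)]
      rw [PySem.Set.ofList_cons]
      congr 1
      rw [← ih]
      show List.filter (fun z => !(z == x)) (List.filter (fun z => !(z == y)) (PySem.Set.ofList t))
          = List.filter (fun z => !(z == y)) (List.filter (fun z => !(z == x)) (PySem.Set.ofList t))
      rw [List.filter_filter, List.filter_filter]
      congr 1
      funext a
      exact Bool.and_comm _ _

-- multiplicity of x = length lost when every occurrence of x is filtered out
theorem pvCountLen (x : Int) (l : List Int) :
    ((l.count x : Nat) : Int) = (l.length : Int) - ((l.filter (fun y => y != x)).length : Int) := by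
  induction l with
  | nil => simp
  | cons a t ih =>
    by_cases h : a = x
    · subst h
      simp only [List.count_cons, List.filter_cons, List.length_cons]
      simp only [BEq.rfl, bne_self_eq_false, Bool.false_eq_true, if_true, if_false]
      push_cast
      omega
    · simp only [List.count_cons, List.filter_cons, List.length_cons]
      rw [if_neg (by simpa using h), if_pos (by simpa using h)]
      simp only [List.length_cons]
      push_cast
      omega

-- one unfolding of the characterisation
theorem pvSpecCons (x : Int) (xs : List Int) :
    pvSpecPair (x :: xs) =
      ((pvSpecPair (List.filter (fun y => y != x) xs)).1 + 1,
       max (((x :: xs).count x : Nat) : Int)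
           (pvSpecPair (List.filter (fun y => y != x) xs)).2) := by
  unfold pvSpecPair
  rw [PySem.Set.ofList_cons, pvOfListFilter x xs]
  have hmap : (PySem.Set.ofList (List.filter (fun y => y != x) xs)).map
        (fun k => (((x :: xs).count k : Nat) : Int))
      = (PySem.Set.ofList (List.filter (fun y => y != x) xs)).map
        (fun k => (((List.filter (fun y => y != x) xs).count k : Nat) : Int)) := by
    apply List.map_congr_left
    intro k hk
    have hk' : k ∈ List.filter (fun y => y != x) xs := (PySem.Set.mem_ofList _ _).1 hk
    have hkx : k ≠ x := by
      have := (List.mem_filter.1 hk').2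
      simpa using this
    rw [List.count_cons_of_ne hkx.symm]
    norm_cast
    exact (List.count_filter (by simpa using hkx)).symm
  simp only [List.map_cons, List.foldl_cons, List.length_cons, pvMaxStep, hmap]
  rw [Prod.mk.injEq]
  constructor
  · push_cast; omega
  · rw [max_comm 0 _]
    exact pvFoldlMaxShift _ _ _

-- one unfolding of B's recursion
theorem pvGoCons (x : Int) (xs : List Int) :
    Z1v2Go (x :: xs) =
      ((Z1v2Go (List.filter (fun y => y != x) xs)).1 + 1,
       if (Z1v2Go (List.filter (fun y => y != x) xs)).2 > (((x :: xs).count x : Nat) : Int)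
       then (Z1v2Go (List.filter (fun y => y != x) xs)).2
       else (((x :: xs).count x : Nat) : Int)) := by
  rw [Z1v2Go]
  have hr : List.filter (fun y => y != x) (x :: xs) = List.filter (fun y => y != x) xs :=
    List.filter_cons_of_neg (by simp)
  have hc : (((x :: xs).length : Int) - ((List.filter (fun y => y != x) xs).length : Int))
      = (((x :: xs).count x : Nat) : Int) := by
    rw [pvCountLen x (x :: xs), hr]
  simp only [hr, hc]

theorem pvGoSpec (ls : List Int) : Z1v2Go ls = pvSpecPair ls := by
  induction ls using Z1v2Go.induct with
  | case1 => simp [Z1v2Go, pvSpecPair, PySem.Set.ofList_nil]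
  | case2 x xs rest ih =>
    have ih' : Z1v2Go (List.filter (fun y => y != x) xs)
        = pvSpecPair (List.filter (fun y => y != x) xs) := by
      have h : List.filter (fun y => y != x) (x :: xs) = List.filter (fun y => y != x) xs :=
        List.filter_cons_of_neg (by simp)
      have ih2 : Z1v2Go (List.filter (fun y => y != x) (x :: xs))
          = pvSpecPair (List.filter (fun y => y != x) (x :: xs)) := ih
      rwa [h] at ih2
    rw [pvGoCons, pvSpecCons, ih']
    simp [pvMaxStep]

theorem pvASpec (g : List String) : Z1v2 g = pvSpecPair (g.map (fun s => PySem.Str.len s)) := by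
  have hstep : (fun (d : PySem.Dict Int Int) (i : String) =>
      if !(d.contains (PySem.Str.len i)) then d.insert (PySem.Str.len i) 1
      else d.insert (PySem.Str.len i) (d.getD (PySem.Str.len i) 0 + 1))
      = fun (d : PySem.Dict Int Int) (i : String) =>
          d.insert (PySem.Str.len i) (d.getD (PySem.Str.len i) 0 + 1) := by
    funext d i
    cases h : d.contains (PySem.Str.len i)
    · rw [if_pos (show (!false) = true from rfl), PySem.Dict.getD_of_not_contains d 0 h]
      norm_num
    · rw [if_neg (by simp)]
  have hfold : List.foldl (fun (d : PySem.Dict Int Int) (i : String) =>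
        d.insert (PySem.Str.len i) (d.getD (PySem.Str.len i) 0 + 1)) PySem.Dict.empty g
      = PySem.Dict.counter (g.map fun s => PySem.Str.len s) := by
    rw [← PySem.Dict.foldl_insert_getD_add_one_eq_counter, List.foldl_map]
  simp only [Z1v2, hstep, hfold]
  have hitems := PySem.Dict.items_counter (g.map fun s => PySem.Str.len s)
  unfold pvSpecPair
  rw [Prod.mk.injEq]
  constructor
  · simp only [PySem.Dict.size, hitems, List.length_map]
  · simp only [PySem.Dict.values, hitems, List.map_map]
    rfl

-- ===== VERDICT (by name: the statement is the Claim_ definition above) =====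
theorem Z1v2_spec : Claim_equal_Z1v2 := by
  intro g _
  show Z1v2 g = Z1v2_alt g
  rw [pvASpec, Z1v2_alt, pvGoSpec]
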